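-- pv_equiv track=rewrite | github.com/Song-Juntae/baekjoonhub | 프로그래머스/1/42862. 체육복/체육복.py | solution
-- ===== SOURCE A (Python) =====
-- def solution(n, lost, reserve):
--     cnt = n
--     l = set(lost) - set(reserve)
--     r = set(reserve) - set(lost)
--     for i in sorted(l):
--         if i - 1 in r:
--             r.remove(i - 1)
--         elif i + 1 in r:
--             r.remove(i + 1)
--         else:
--             cnt -= 1
--     return cnt
-- ===== SOURCE B (Python) =====
-- def solution(n, lost, reserve):
--     # Two-pointer merge over the sorted difference sets instead of hash-set
--     # membership tests and removals.
--     ls = sorted(set(lost) - set(reserve))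
--     rs = sorted(set(reserve) - set(lost))
--     cnt = n
--     j = 0
--     for i in ls:
--         while j < len(rs) and rs[j] < i - 1:
--             j += 1
--         if j < len(rs) and (rs[j] == i - 1 or rs[j] == i + 1):
--             j += 1
--         else:
--             cnt -= 1
--     return cnt
-- ===== Notes on version B (the rewrite author's own statement) =====
-- stated objective: alternative
-- what changed: Replaced the hash-set membership/removal greedy over sorted lost with a two-pointer merge scan over both sorted difference sets, so no set is mutated during the loop.
import Mathlib
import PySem

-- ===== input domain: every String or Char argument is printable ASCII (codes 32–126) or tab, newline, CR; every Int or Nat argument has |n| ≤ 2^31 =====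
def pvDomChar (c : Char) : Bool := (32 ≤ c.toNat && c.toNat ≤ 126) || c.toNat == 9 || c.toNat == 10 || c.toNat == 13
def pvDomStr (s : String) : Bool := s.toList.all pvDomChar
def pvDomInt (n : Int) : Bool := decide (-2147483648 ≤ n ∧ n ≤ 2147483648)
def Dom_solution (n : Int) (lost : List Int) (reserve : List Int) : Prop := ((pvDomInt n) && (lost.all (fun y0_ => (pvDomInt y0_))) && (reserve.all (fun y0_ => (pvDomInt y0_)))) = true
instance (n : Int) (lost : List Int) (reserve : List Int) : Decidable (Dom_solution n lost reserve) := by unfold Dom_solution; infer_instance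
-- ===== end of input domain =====

-- B replaces A's hash-set membership/removal greedy with a two-pointer merge
-- scan over both sorted difference sets (alternative algorithm, similar cost).


-- ===== PORT A =====
-- literal port of A: l = set(lost)-set(reserve), r = set(reserve)-set(lost),
-- then a fold over sorted(l) carrying (cnt, r); 'r.remove' is guarded by the
-- membership test, so PySem.Set.discard is exact here.
def solution (n : Int) (lost : List Int) (reserve : List Int) : Int :=
  let l : PySem.Set Int := PySem.Set.diff (PySem.Set.ofList lost) (PySem.Set.ofList reserve)
  let r : PySem.Set Int := PySem.Set.diff (PySem.Set.ofList reserve) (PySem.Set.ofList lost)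
  ((PySem.List.sorted l (fun x => x)).foldl
    (fun (st : Int × PySem.Set Int) i =>
      if PySem.Set.contains st.2 (i - 1) then (st.1, PySem.Set.discard st.2 (i - 1))
      else if PySem.Set.contains st.2 (i + 1) then (st.1, PySem.Set.discard st.2 (i + 1))
      else (st.1 - 1, st.2)) (n, r)).1

-- ===== PORT B =====
-- the for-loop over ls with the inner while over rs[j:] becomes a recursion on
-- (ls, remaining rs): the 'skip' branch advances rs only, exactly like j += 1.
def goAlt : List Int → List Int → Int → Int
  | [], _, cnt => cnt
  | _ :: ls, [], cnt => goAlt ls [] (cnt - 1)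
  | i :: ls, x :: rs, cnt =>
      if x < i - 1 then goAlt (i :: ls) rs cnt
      else if x = i - 1 ∨ x = i + 1 then goAlt ls rs cnt
      else goAlt ls (x :: rs) (cnt - 1)
  termination_by ls rs _ => ls.length + rs.length

def solution_alt (n : Int) (lost : List Int) (reserve : List Int) : Int :=
  let ls := PySem.List.sorted (PySem.Set.diff (PySem.Set.ofList lost) (PySem.Set.ofList reserve)) (fun x => x)
  let rs := PySem.List.sorted (PySem.Set.diff (PySem.Set.ofList reserve) (PySem.Set.ofList lost)) (fun x => x)
  goAlt ls rs n

-- ===== PRECONDITION & SPEC =====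
def Spec_solution (n : Int) (lost : List Int) (reserve : List Int) (out : Int) : Prop := out = solution_alt n lost reserve
instance (n : Int) (lost : List Int) (reserve : List Int) (out : Int) : Decidable (Spec_solution n lost reserve out) := by unfold Spec_solution; infer_instance

-- ===== CLAIM (what is proved, stated in full; the proofs are below) =====
def Claim_equal_solution : Prop := ∀ (n : Int) (lost : List Int) (reserve : List Int), Dom_solution n lost reserve → Spec_solution n lost reserve (solution n lost reserve)

-- ===== LEMMAS AND PROOFS =====

lemma pairwise_lt_of_le_nodup (l : List Int) (h : l.Pairwise (· ≤ ·)) (hn : l.Nodup) :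
    l.Pairwise (· < ·) :=
  (h.and hn).imp (fun hp => lt_of_le_of_ne hp.1 hp.2)

-- the loop invariant: A's current set S has the same members as skip ∪ rs,
-- where skip holds the reserve values the two-pointer scan has passed over
-- (all < i - 1 for every remaining lost i) and rs is the remaining suffix.
lemma foldA_eq_goAlt (ls rs : List Int) (cnt : Int) :
    ∀ (skip : List Int) (S : PySem.Set Int),
      ls.Pairwise (· < ·) →
      rs.Pairwise (· < ·) →
      (∀ i ∈ ls, i ∉ rs) →
      (∀ s ∈ skip, ∀ i ∈ ls, s < i - 1) →
      (∀ m, m ∈ S ↔ (m ∈ skip ∨ m ∈ rs)) →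
      (ls.foldl
        (fun (st : Int × PySem.Set Int) i =>
          if PySem.Set.contains st.2 (i - 1) then (st.1, PySem.Set.discard st.2 (i - 1))
          else if PySem.Set.contains st.2 (i + 1) then (st.1, PySem.Set.discard st.2 (i + 1))
          else (st.1 - 1, st.2)) (cnt, S)).1 = goAlt ls rs cnt := by
  induction ls, rs, cnt using goAlt.induct with
  | case1 rs cnt =>
      intro skip S _ _ _ _ _
      simp [goAlt]
  | case2 i ls cnt ih =>
      intro skip S hls _ hdisj hskip hmem
      have h1 : PySem.Set.contains S (i - 1) = false := by
        rw [Bool.eq_false_iff]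
        intro h
        rcases (hmem _).mp (PySem.Set.contains_iff S (i-1) |>.mp h) with h' | h'
        · exact absurd (hskip _ h' i (by simp)) (by omega)
        · simp at h'
      have h2 : PySem.Set.contains S (i + 1) = false := by
        rw [Bool.eq_false_iff]
        intro h
        rcases (hmem _).mp (PySem.Set.contains_iff S (i+1) |>.mp h) with h' | h'
        · exact absurd (hskip _ h' i (by simp)) (by omega)
        · simp at h'
      simp only [List.foldl, h1, h2, Bool.false_eq_true, if_false, goAlt]
      exact ih skip S (List.pairwise_cons.mp hls).2 (by simp)
        (fun j hj => hdisj j (by simp [hj]))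
        (fun s hs j hj => hskip s hs j (by simp [hj])) hmem
  | case3 i ls x rs cnt hx ih =>
      intro skip S hls hrs hdisj hskip hmem
      rw [show goAlt (i :: ls) (x :: rs) cnt = goAlt (i :: ls) rs cnt from by
        rw [goAlt]; rw [if_pos hx]]
      refine ih (skip ++ [x]) S hls (List.pairwise_cons.mp hrs).2
        (fun j hj hjr => hdisj j hj (by simp [hjr])) ?_ ?_
      · intro s hs j hj
        rcases List.mem_append.mp hs with h | h
        · exact hskip s h j hj
        · simp at h; subst h
          rcases List.mem_cons.mp hj with rfl | hj'
          · omega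
          · have := (List.pairwise_cons.mp hls).1 j hj'
            omega
      · intro m
        rw [hmem]
        simp [List.mem_append]
        tauto
  | case4 i ls x rs cnt hx heq ih =>
      intro skip S hls hrs hdisj hskip hmem
      have hxskip : x ∉ skip := fun h => by
        have := hskip x h i (by simp); omega
      have hxrs : x ∉ rs := fun h => by
        have := (List.pairwise_cons.mp hrs).1 x h; omega
      rw [show goAlt (i :: ls) (x :: rs) cnt = goAlt ls rs cnt from by
        rw [goAlt]; rw [if_neg hx, if_pos heq]]
      have hmem' : ∀ m, m ∈ PySem.Set.discard S x ↔ (m ∈ skip ∨ m ∈ rs) := by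
        intro m
        rw [PySem.Set.mem_discard, hmem]
        constructor
        · rintro ⟨h | h, hne⟩
          · exact Or.inl h
          · rcases List.mem_cons.mp h with rfl | h'
            · exact absurd rfl hne
            · exact Or.inr h'
        · rintro (h | h)
          · exact ⟨Or.inl h, fun hc => hxskip (hc ▸ h)⟩
          · exact ⟨Or.inr (by simp [h]), fun hc => hxrs (hc ▸ h)⟩
      have hrest := ih skip (PySem.Set.discard S x) (List.pairwise_cons.mp hls).2
        (List.pairwise_cons.mp hrs).2
        (fun j hj hjr => hdisj j (by simp [hj]) (by simp [hjr]))
        (fun s hs j hj => hskip s hs j (by simp [hj])) hmem'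
      rcases heq with h | h
      · -- x = i - 1 : A removes i - 1
        have h1 : PySem.Set.contains S (i - 1) = true := by
          rw [PySem.Set.contains_iff, hmem]
          exact Or.inr (by simp [← h])
        simp only [List.foldl, h1, if_true]
        rw [← h]
        exact hrest
      · -- x = i + 1 : i - 1 is nowhere, A removes i + 1
        have h1 : PySem.Set.contains S (i - 1) = false := by
          rw [Bool.eq_false_iff]
          intro hc
          rcases (hmem _).mp (PySem.Set.contains_iff S (i-1) |>.mp hc) with h' | h'
          · exact absurd (hskip _ h' i (by simp)) (by omega)
          · rcases List.mem_cons.mp h' with h'' | h''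
            · omega
            · have := (List.pairwise_cons.mp hrs).1 _ h''; omega
        have h2 : PySem.Set.contains S (i + 1) = true := by
          rw [PySem.Set.contains_iff, hmem]
          exact Or.inr (by simp [← h])
        simp only [List.foldl, h1, Bool.false_eq_true, if_false, h2, if_true]
        rw [← h]
        exact hrest
  | case5 i ls x rs cnt hx heq ih =>
      intro skip S hls hrs hdisj hskip hmem
      have hxi : x ≠ i := fun h => hdisj i (by simp) (by simp [← h])
      have h1 : PySem.Set.contains S (i - 1) = false := by
        rw [Bool.eq_false_iff]
        intro hc
        rcases (hmem _).mp (PySem.Set.contains_iff S (i-1) |>.mp hc) with h' | h'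
        · exact absurd (hskip _ h' i (by simp)) (by omega)
        · rcases List.mem_cons.mp h' with h'' | h''
          · exact heq (Or.inl h''.symm)
          · have := (List.pairwise_cons.mp hrs).1 _ h''; omega
      have h2 : PySem.Set.contains S (i + 1) = false := by
        rw [Bool.eq_false_iff]
        intro hc
        rcases (hmem _).mp (PySem.Set.contains_iff S (i+1) |>.mp hc) with h' | h'
        · exact absurd (hskip _ h' i (by simp)) (by omega)
        · rcases List.mem_cons.mp h' with h'' | h''
          · exact heq (Or.inr h''.symm)
          · have := (List.pairwise_cons.mp hrs).1 _ h''
            have hge : i + 2 ≤ x := by omega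
            omega
      rw [show goAlt (i :: ls) (x :: rs) cnt = goAlt ls (x :: rs) (cnt - 1) from by
        rw [goAlt]; rw [if_neg hx, if_neg heq]]
      simp only [List.foldl, h1, h2, Bool.false_eq_true, if_false]
      exact ih skip S (List.pairwise_cons.mp hls).2 hrs
        (fun j hj => hdisj j (by simp [hj]))
        (fun s hs j hj => hskip s hs j (by simp [hj])) hmem

lemma sorted_set_pairwise_lt (s : PySem.Set Int) (hn : s.Nodup) :
    (PySem.List.sorted s (fun x => x)).Pairwise (· < ·) :=
  pairwise_lt_of_le_nodup _ (PySem.List.sorted_pairwise s (fun x => x))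
    ((PySem.List.sorted_perm s (fun x => x) false).symm.nodup hn)

-- ===== VERDICT (by name: the statement is the Claim_ definition above) =====
theorem solution_spec : Claim_equal_solution := by
  intro n lost reserve _
  unfold Spec_solution solution solution_alt
  have hL := PySem.Set.nodup_ofList lost
  have hR := PySem.Set.nodup_ofList reserve
  have hl := PySem.Set.nodup_diff (PySem.Set.ofList lost) (PySem.Set.ofList reserve) hL
  have hr := PySem.Set.nodup_diff (PySem.Set.ofList reserve) (PySem.Set.ofList lost) hR
  refine foldA_eq_goAlt _ _ n []
    (PySem.Set.diff (PySem.Set.ofList reserve) (PySem.Set.ofList lost))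
    (sorted_set_pairwise_lt _ hl) (sorted_set_pairwise_lt _ hr) ?_ (by simp) ?_
  · intro i hi hir
    have hi' := (PySem.List.sorted_perm _ (fun x => x) false).mem_iff.mp hi
    have hir' := (PySem.List.sorted_perm _ (fun x => x) false).mem_iff.mp hir
    rw [PySem.Set.mem_diff] at hi' hir'
    simp at hi' hir'
    exact hir'.2 hi'.1
  · intro m
    simp only [List.mem_nil_iff, false_or]
    exact ((PySem.List.sorted_perm _ (fun x => x) false).mem_iff).symm
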